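-- pv_equiv track=rewrite | github.com/foursixnine/qem-bot | openqabot/types/incident.py | _is_livepatch
-- ===== SOURCE A (Python) =====
-- from typing import Dict, List, Tuple
--
-- def _is_livepatch(packages: List[str]) -> bool:
--     kgraft = False
--
--     for package in packages:
--         if (
--             package.startswith("kernel-default")
--             or package.startswith("kernel-source")
--             or package.startswith("kernel-azure")
--         ):
--             return False
--         if package.startswith("kgraft-patch-") or package.startswith(
--             "kernel-livepatch"
--         ):
--             kgraft = True
--
--     return kgraft
-- ===== SOURCE B (Python) =====
-- from typing import List
--
-- def _is_livepatch(packages: List[str]) -> bool: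
--     if any(p.startswith(("kernel-default", "kernel-source", "kernel-azure")) for p in packages):
--         return False
--     return any(p.startswith(("kgraft-patch-", "kernel-livepatch")) for p in packages)
-- ===== Notes on version B (the rewrite author's own statement) =====
-- stated objective: idiomatic
-- what changed: The single fused loop with a mutable kgraft flag and an early return is replaced by two independent existence scans with any() and tuple-argument startswith.
import Mathlib
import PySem

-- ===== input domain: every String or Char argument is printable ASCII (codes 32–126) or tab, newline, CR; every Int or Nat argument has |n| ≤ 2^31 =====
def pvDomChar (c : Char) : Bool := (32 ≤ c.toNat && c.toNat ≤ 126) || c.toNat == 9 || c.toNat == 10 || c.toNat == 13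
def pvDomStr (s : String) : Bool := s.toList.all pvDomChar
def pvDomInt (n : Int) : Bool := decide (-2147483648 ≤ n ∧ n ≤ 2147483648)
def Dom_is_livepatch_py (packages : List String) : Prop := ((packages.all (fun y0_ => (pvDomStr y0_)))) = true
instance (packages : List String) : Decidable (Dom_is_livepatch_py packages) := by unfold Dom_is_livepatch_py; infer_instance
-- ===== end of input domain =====

-- B replaces A's fused flag-carrying loop by two independent any() existence scans (idiomatic decomposition).
-- ===== PORT A =====
-- loop over packages carrying the kgraft flag; early `return False` modelled by returning false immediately
def is_livepatch_py_loop (packages : List String) (kgraft : Bool) : Bool :=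
  match packages with
  | [] => kgraft
  | package :: rest =>
    if PySem.Str.startswith package "kernel-default"
        || PySem.Str.startswith package "kernel-source"
        || PySem.Str.startswith package "kernel-azure" then
      false
    else if PySem.Str.startswith package "kgraft-patch-"
        || PySem.Str.startswith package "kernel-livepatch" then
      is_livepatch_py_loop rest true
    else
      is_livepatch_py_loop rest kgraft

def is_livepatch_py (packages : List String) : Bool :=
  is_livepatch_py_loop packages false

-- ===== PORT B =====
def is_livepatch_py_alt (packages : List String) : Bool :=
  if packages.any (fun p => PySem.Str.startswith p "kernel-default"
      || PySem.Str.startswith p "kernel-source"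
      || PySem.Str.startswith p "kernel-azure") then
    false
  else
    packages.any (fun p => PySem.Str.startswith p "kgraft-patch-"
      || PySem.Str.startswith p "kernel-livepatch")

-- ===== PRECONDITION & SPEC =====
def Spec_is_livepatch_py (packages : List String) (out : Bool) : Prop := out = is_livepatch_py_alt packages
instance (packages : List String) (out : Bool) : Decidable (Spec_is_livepatch_py packages out) := by unfold Spec_is_livepatch_py; infer_instance

-- ===== CLAIM (what is proved, stated in full; the proofs are below) =====
def Claim_equal_is_livepatch_py : Prop := ∀ (packages : List String), Dom_is_livepatch_py packages → Spec_is_livepatch_py packages (is_livepatch_py packages)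

-- ===== LEMMAS AND PROOFS =====

-- loop invariant: the fused loop equals "no disqualifier, and (flag or some livepatch prefix)"
theorem is_livepatch_py_loop_eq (packages : List String) (kgraft : Bool) :
    is_livepatch_py_loop packages kgraft =
      (!(packages.any (fun p => PySem.Str.startswith p "kernel-default"
          || PySem.Str.startswith p "kernel-source"
          || PySem.Str.startswith p "kernel-azure"))
        && (kgraft || packages.any (fun p => PySem.Str.startswith p "kgraft-patch-"
          || PySem.Str.startswith p "kernel-livepatch"))) := by
  induction packages generalizing kgraft with
  | nil => simp [is_livepatch_py_loop]
  | cons p rest ih =>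
    simp only [is_livepatch_py_loop, List.any_cons]
    split_ifs with h1 h2
    · simp only [h1, Bool.true_or, Bool.not_true, Bool.false_and]
    · rw [Bool.not_eq_true] at h1
      simp only [ih, h1, h2, Bool.false_or, Bool.true_or, Bool.or_true, Bool.and_true]
    · rw [Bool.not_eq_true] at h1 h2
      simp only [ih, h1, h2, Bool.false_or]

-- ===== VERDICT (by name: the statement is the Claim_ definition above) =====
theorem is_livepatch_py_spec : Claim_equal_is_livepatch_py := by
  intro packages _
  unfold Spec_is_livepatch_py is_livepatch_py is_livepatch_py_alt
  rw [is_livepatch_py_loop_eq]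
  cases hD : packages.any (fun p => PySem.Str.startswith p "kernel-default"
      || PySem.Str.startswith p "kernel-source"
      || PySem.Str.startswith p "kernel-azure") <;>
    simp only [hD, Bool.not_true, Bool.not_false, Bool.false_and, Bool.true_and,
      Bool.false_or] <;> rfl
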